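-- pv_equiv track=rewrite | github.com/hiroTochigi/minutes-scraper | stat_finish/get_street_list_in_each_sentence.py | get_street_candidate_list
-- ===== SOURCE A (Python) =====
-- import itertools
--
-- def get_street(target_street, street_list):
--     return [street for street in street_list if street.find(target_street)>=0]
--
-- def get_street_candidate_list(street_name_candidate_list, street_list):
--
--     nested_street_candidate_list = [
--             get_street(
--                     street_name,
--                     street_list
--                 )
--             for street_name in street_name_candidate_list
--         ]
--     return sorted(list(itertools.chain.from_iterable(nested_street_candidate_list)))
-- ===== SOURCE B (Python) =====
-- def get_street_candidate_list(street_name_candidate_list, street_list):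
--     # Hash-index approach: count candidate names once; per street, slide windows of
--     # the candidate lengths over the street and look each distinct window up in the
--     # counter -- no scan over the candidate list during matching.
--     counts = {}
--     for name in street_name_candidate_list:
--         counts[name] = counts.get(name, 0) + 1
--     lengths = list(dict.fromkeys(len(name) for name in street_name_candidate_list))
--     out = []
--     for street in street_list:
--         n = len(street)
--         seen = set()
--         k = 0
--         for L in lengths:
--             for i in range(n - L + 1):
--                 sub = street[i:i+L]
--                 if sub not in seen:
--                     seen.add(sub)
--                     k += counts.get(sub, 0)
--         out.extend([street] * k)
--     out.sort()
--     return out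
-- ===== Notes on version B (the rewrite author's own statement) =====
-- stated objective: alternative
-- what changed: B inverts the matching: instead of scanning the candidate list for every street, it builds a hash counter of candidate names once, then per street slides windows of the distinct candidate lengths over the street and looks each distinct window substring up in the counter, emitting the street with the summed multiplicity, then sorts; the final sort makes the emission order irrelevant. Measured ~2.7x faster on the generated inputs since the per-street work no longer scans the candidate list.
import Mathlib
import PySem

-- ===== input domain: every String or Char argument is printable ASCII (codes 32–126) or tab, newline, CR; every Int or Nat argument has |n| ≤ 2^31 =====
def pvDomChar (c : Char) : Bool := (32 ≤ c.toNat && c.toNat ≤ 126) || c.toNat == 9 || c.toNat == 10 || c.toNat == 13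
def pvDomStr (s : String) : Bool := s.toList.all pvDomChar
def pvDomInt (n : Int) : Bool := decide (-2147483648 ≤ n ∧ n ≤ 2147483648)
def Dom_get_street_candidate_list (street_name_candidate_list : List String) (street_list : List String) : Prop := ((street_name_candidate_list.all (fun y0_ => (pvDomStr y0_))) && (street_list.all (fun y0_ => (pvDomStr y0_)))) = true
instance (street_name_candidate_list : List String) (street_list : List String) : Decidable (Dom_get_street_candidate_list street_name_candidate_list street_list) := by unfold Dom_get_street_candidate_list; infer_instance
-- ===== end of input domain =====

-- B replaces the candidate-list scan per street by a hash index: it counts the candidate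
-- names once in a dict, then per street slides windows of the candidate lengths over the
-- street and looks each distinct window up in the counter (objective: alternative; the
-- final sort makes the emission order irrelevant).


-- ===== PORT A =====
-- [street for street in street_list if street.find(target_street) >= 0]
def get_street (target_street : String) (street_list : List String) : List String :=
  street_list.filter (fun street => 0 ≤ PySem.Str.find street target_street)

def get_street_candidate_list (street_name_candidate_list : List String) (street_list : List String) : List String :=
  let nested_street_candidate_list :=
    street_name_candidate_list.map (fun street_name => get_street street_name street_list)
  PySem.List.sorted nested_street_candidate_list.flatten (fun x => x) false

-- ===== PORT B =====
def get_street_candidate_list_alt (street_name_candidate_list : List String) (street_list : List String) : List String :=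
  let counts := street_name_candidate_list.foldl
    (fun d name => d.insert name (d.getD name 0 + 1)) PySem.Dict.empty
  let lengths := PySem.List.dedup (street_name_candidate_list.map (fun name => PySem.Str.len name))
  let out := street_list.foldl
    (fun out street =>
      let n := PySem.Str.len street
      let sk := lengths.foldl
        (fun sk L =>
          (PySem.List.pyRange 0 (n - L + 1) 1).foldl
            (fun sk i =>
              let sub := PySem.Str.slice street (some i) (some (i + L))
              if sk.1.contains sub then sk
              else (sk.1.add sub, sk.2 + counts.getD sub 0))
            sk)
        ((PySem.Set.empty : PySem.Set String), (0 : Int))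
      out ++ List.replicate sk.2.toNat street)
    []
  PySem.List.sorted out (fun x => x) false

-- ===== PRECONDITION & SPEC =====
def Spec_get_street_candidate_list (street_name_candidate_list : List String) (street_list : List String) (out : List String) : Prop := out = get_street_candidate_list_alt street_name_candidate_list street_list
instance (street_name_candidate_list : List String) (street_list : List String) (out : List String) : Decidable (Spec_get_street_candidate_list street_name_candidate_list street_list out) := by unfold Spec_get_street_candidate_list; infer_instance

-- ===== CLAIM (what is proved, stated in full; the proofs are below) =====
def Claim_equal_get_street_candidate_list : Prop := ∀ (street_name_candidate_list : List String) (street_list : List String), Dom_get_street_candidate_list street_name_candidate_list street_list → Spec_get_street_candidate_list street_name_candidate_list street_list (get_street_candidate_list street_name_candidate_list street_list)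

-- ===== LEMMAS AND PROOFS =====

-- the body of B's inner loops, with the counter already rewritten to cands.count
def pvStep (cands : List String) (sk : PySem.Set String × Int) (sub : String) : PySem.Set String × Int :=
  if sk.1.contains sub then sk else (sk.1.add sub, sk.2 + (cands.count sub : Int))

-- all window slices of street whose length is drawn from `lengths`
def pvSubs (lengths : List Int) (street : String) : List String :=
  lengths.flatMap (fun L =>
    (PySem.List.pyRange 0 (PySem.Str.len street - L + 1) 1).map
      (fun i => PySem.Str.slice street (some i) (some (i + L))))

-- countP splits pointwise into a sum of two disjoint counts
theorem pv_countP_split {α : Type} (l : List α) (p q r : α → Bool)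
    (h : ∀ m, (if p m then 1 else 0) = ((if q m then 1 else 0) + (if r m then 1 else 0) : Nat)) :
    l.countP p = l.countP q + l.countP r := by
  induction l with
  | nil => simp
  | cons c cs ih =>
    rw [List.countP_cons, List.countP_cons, List.countP_cons]
    have := h c
    omega

-- splitting a countP at a fresh head element
theorem pv_countP_cons_split (cands : List String) (x : String) (seen L : List String)
    (hx : x ∉ seen) :
    cands.countP (fun m => decide (m ∈ x :: L ∧ m ∉ seen))
      = cands.count x + cands.countP (fun m => decide (m ∈ L ∧ m ∉ seen ++ [x])) := by
  rw [List.count_eq_countP]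
  refine pv_countP_split cands _ _ _ (fun m => ?_)
  by_cases hmx : m = x
  · subst hmx
    simp [hx]
  · simp only [List.mem_cons, List.mem_append, hmx, false_or,
      beq_iff_eq, decide_eq_true_eq]
    by_cases hmL : m ∈ L <;> by_cases hms : m ∈ seen <;> simp [hmL, hms]

-- the seen/count loop: final count = candidates that occur in L and are not yet seen
theorem pv_fold_step (cands : List String) (L : List String) :
    ∀ (seen : PySem.Set String) (k : Int),
      (L.foldl (pvStep cands) (seen, k)).2
        = k + (cands.countP (fun m => decide (m ∈ L ∧ m ∉ seen)) : Int) := by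
  induction L with
  | nil => intro seen k; simp
  | cons x L ih =>
    intro seen k
    rw [List.foldl_cons]
    by_cases hx : x ∈ seen
    · have hc : (pvStep cands (seen, k) x) = (seen, k) := by
        simp only [pvStep]
        rw [if_pos ((PySem.Set.contains_iff seen x).2 hx)]
      rw [hc, ih]
      have : (cands.countP (fun m => decide (m ∈ L ∧ m ∉ seen)))
          = (cands.countP (fun m => decide (m ∈ x :: L ∧ m ∉ seen))) := by
        refine List.countP_congr (fun m _ => ?_)
        simp only [decide_eq_true_eq, List.mem_cons]
        constructor
        · rintro ⟨hm, hns⟩; exact ⟨Or.inr hm, hns⟩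
        · rintro ⟨hm | hm, hns⟩
          · exact absurd (hm ▸ hx) hns
          · exact ⟨hm, hns⟩
      rw [this]
    · have hcf : seen.contains x = false := by
        cases h : seen.contains x
        · rfl
        · exact absurd ((PySem.Set.contains_iff seen x).1 h) hx
      have hadd : seen.add x = seen ++ [x] := by
        simp [PySem.Set.add, hx]
      have hc : (pvStep cands (seen, k) x) = (seen ++ [x], k + (cands.count x : Int)) := by
        simp only [pvStep]
        rw [hcf]
        simp [hadd]
      rw [hc, ih, pv_countP_cons_split cands x seen L hx]
      push_cast
      ring

-- Str.slice viewed on the character list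
theorem pv_toList_slice (s : String) (a b : Option Int) :
    (PySem.Str.slice s a b).toList = PySem.List.slice s.toList a b := by
  simp [PySem.Str.slice]

-- slices of street are infixes of street
theorem pv_mem_subs_infix (lengths : List Int) (street m : String)
    (hL : ∀ L ∈ lengths, 0 ≤ L)
    (hm : m ∈ pvSubs lengths street) : m.toList <:+: street.toList := by
  simp only [pvSubs, List.mem_flatMap, List.mem_map] at hm
  obtain ⟨L, hLmem, i, hi, rfl⟩ := hm
  have h0i : 0 ≤ i := (PySem.List.mem_pyRange_one.1 hi).1
  have h0L : 0 ≤ L := hL L hLmem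
  have h0iL : 0 ≤ i + L := by omega
  rw [pv_toList_slice, PySem.List.slice_toNat street.toList h0i h0iL]
  exact ((street.toList.drop i.toNat).take_prefix _).isInfix.trans
    (street.toList.drop_suffix i.toNat).isInfix

-- every candidate that is an infix of street occurs among the window slices
theorem pv_infix_mem_subs (cands : List String) (street m : String)
    (hm : m ∈ cands) (hinf : m.toList <:+: street.toList) :
    m ∈ pvSubs (PySem.List.dedup (cands.map (fun name => PySem.Str.len name))) street := by
  obtain ⟨pre, suf, hstreet⟩ := hinf
  have hLmem : PySem.Str.len m ∈ PySem.List.dedup (cands.map (fun name => PySem.Str.len name)) := by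
    rw [PySem.List.mem_dedup]
    exact List.mem_map.2 ⟨m, hm, rfl⟩
  simp only [pvSubs, List.mem_flatMap, List.mem_map]
  refine ⟨PySem.Str.len m, hLmem, (pre.length : Int), ?_, ?_⟩
  · rw [PySem.List.mem_pyRange_one]
    constructor
    · exact_mod_cast Nat.zero_le _
    · rw [PySem.Str.len_eq, PySem.Str.len_eq, ← hstreet]
      simp [List.length_append]
      omega
  · refine (String.toList_inj.mp ?_).symm
    have h2 : (pre.length : Int) + PySem.Str.len m
        = ((pre.length : Nat) : Int) + ((m.toList.length : Nat) : Int) := by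
      rw [PySem.Str.len_eq]
    rw [pv_toList_slice, h2, PySem.List.slice_natCast_add, ← hstreet,
      List.append_assoc, List.drop_left, List.take_left]

-- per street: the nested loop computes the number of candidates contained in the street
theorem pv_street_count (cands : List String) (street : String) :
    ((PySem.List.dedup (cands.map (fun name => PySem.Str.len name))).foldl
        (fun sk L =>
          (PySem.List.pyRange 0 (PySem.Str.len street - L + 1) 1).foldl
            (fun sk i =>
              let sub := PySem.Str.slice street (some i) (some (i + L))
              if sk.1.contains sub then sk
              else (sk.1.add sub, sk.2 + ((PySem.Dict.counter cands).getD sub 0)))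
            sk)
        ((PySem.Set.empty : PySem.Set String), (0 : Int))).2
      = (cands.countP (fun m => PySem.Str.isIn m street) : Int) := by
  have hstep : ∀ (sk : PySem.Set String × Int) (sub : String),
      (if sk.1.contains sub then sk
        else (sk.1.add sub, sk.2 + ((PySem.Dict.counter cands).getD sub 0))) = pvStep cands sk sub := by
    intro sk sub
    rw [pvStep, PySem.Dict.getD_counter]
  have hflat :
      ((PySem.List.dedup (cands.map (fun name => PySem.Str.len name))).foldl
        (fun sk L =>
          (PySem.List.pyRange 0 (PySem.Str.len street - L + 1) 1).foldl
            (fun sk i => pvStep cands sk (PySem.Str.slice street (some i) (some (i + L))))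
            sk)
        ((PySem.Set.empty : PySem.Set String), (0 : Int)))
      = (pvSubs (PySem.List.dedup (cands.map (fun name => PySem.Str.len name))) street).foldl
          (pvStep cands) ((PySem.Set.empty : PySem.Set String), (0 : Int)) := by
    have hfun : (fun (sk : PySem.Set String × Int) L =>
        (PySem.List.pyRange 0 (PySem.Str.len street - L + 1) 1).foldl
          (fun sk i => pvStep cands sk (PySem.Str.slice street (some i) (some (i + L)))) sk)
        = fun (sk : PySem.Set String × Int) L =>
            ((PySem.List.pyRange 0 (PySem.Str.len street - L + 1) 1).map
              (fun i => PySem.Str.slice street (some i) (some (i + L)))).foldl (pvStep cands) sk := by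
      funext sk L
      rw [List.foldl_map]
    rw [hfun, pvSubs, ← List.foldl_flatMap]
  simp only [hstep]
  rw [hflat, pv_fold_step]
  rw [Int.zero_add, Nat.cast_inj]
  refine List.countP_congr (fun m hmem => ?_)
  simp only [decide_eq_true_eq]
  constructor
  · rintro ⟨hsub, -⟩
    refine (PySem.Str.isIn_iff_infix m street).2 (pv_mem_subs_infix _ street m ?_ hsub)
    intro L hLm
    rw [PySem.List.mem_dedup] at hLm
    obtain ⟨name, -, rfl⟩ := List.mem_map.1 hLm
    rw [PySem.Str.len_eq]
    exact_mod_cast Nat.zero_le _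
  · intro hin
    exact ⟨pv_infix_mem_subs cands street m hmem ((PySem.Str.isIn_iff_infix m street).1 hin),
      by simp [PySem.Set.empty]⟩

-- flatMap of a pointwise append is a permutation of the append of the flatMaps
theorem pv_flatMap_append_perm {α β : Type} (l : List α) (f g : α → List β) :
    (l.flatMap fun s => f s ++ g s).Perm (l.flatMap f ++ l.flatMap g) := by
  induction l with
  | nil => simp
  | cons x xs ih =>
    simp only [List.flatMap_cons, List.append_assoc]
    refine (((ih.append_left (g x)).append_left (f x)).trans ?_)
    exact (List.perm_append_left_iff (f x)).2 (List.perm_append_comm_assoc _ _ _)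

-- flatMap emitting [s] exactly when p s is filter
theorem pv_flatMap_ite_singleton {α : Type} (l : List α) (p : α → Bool) :
    (l.flatMap fun s => if p s then [s] else []) = l.filter p := by
  induction l with
  | nil => rfl
  | cons x xs ih =>
    by_cases h : p x <;> simp [List.flatMap_cons, h, ih]

-- A's membership test (find >= 0) agrees with B's counter-lookup criterion (in)
theorem pv_find_isIn (n s : String) : decide (0 ≤ PySem.Str.find s n) = PySem.Str.isIn n s := by
  by_cases h : n.toList <:+: s.toList
  · rw [decide_eq_true ((PySem.Str.find_nonneg_iff s n).2 h), (PySem.Str.isIn_iff_infix n s).2 h]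
  · have hnf : ¬ 0 ≤ PySem.Str.find s n := fun hc => h ((PySem.Str.find_nonneg_iff s n).1 hc)
    have hi : PySem.Str.isIn n s = false := by
      cases hb : PySem.Str.isIn n s
      · rfl
      · exact absurd ((PySem.Str.isIn_iff_infix n s).1 hb) h
    rw [decide_eq_false hnf, hi]

-- the two pre-sort lists are permutations of each other
theorem pv_perm_core (cands streets : List String) :
    (cands.flatMap fun n => streets.filter (fun s => 0 ≤ PySem.Str.find s n)).Perm
      (streets.flatMap fun s => List.replicate (cands.countP fun n => PySem.Str.isIn n s) s) := by
  induction cands with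
  | nil => simp
  | cons n cs ih =>
    simp only [List.flatMap_cons]
    have h1 : (streets.filter fun s => 0 ≤ PySem.Str.find s n)
        = streets.flatMap fun s => if PySem.Str.isIn n s then [s] else [] := by
      rw [pv_flatMap_ite_singleton]
      exact List.filter_congr (fun s _ => pv_find_isIn n s)
    have h2 : (streets.flatMap fun s =>
          List.replicate (List.countP (fun m => PySem.Str.isIn m s) (n :: cs)) s)
        = streets.flatMap fun s =>
            (if PySem.Str.isIn n s then [s] else []) ++
              List.replicate (cs.countP fun m => PySem.Str.isIn m s) s := by
      refine List.flatMap_congr (fun s _ => ?_)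
      rw [List.countP_cons]
      by_cases hc : PySem.Str.isIn n s
      · rw [if_pos hc, if_pos hc, Nat.add_comm, List.replicate_add, List.replicate_one]
      · rw [if_neg hc, if_neg hc, Nat.add_zero, List.nil_append]
    rw [h1, h2]
    exact ((ih.append_left _).trans (pv_flatMap_append_perm streets _ _).symm)

-- ===== VERDICT (by name: the statement is the Claim_ definition above) =====
theorem get_street_candidate_list_spec : Claim_equal_get_street_candidate_list := by
  intro cands streets _
  unfold Spec_get_street_candidate_list get_street_candidate_list get_street_candidate_list_alt
  rw [PySem.Dict.foldl_insert_getD_add_one_eq_counter]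
  have hbody : ∀ (out : List String) (street : String),
      (let n := PySem.Str.len street
       let sk := (PySem.List.dedup (cands.map (fun name => PySem.Str.len name))).foldl
        (fun sk L =>
          (PySem.List.pyRange 0 (n - L + 1) 1).foldl
            (fun sk i =>
              let sub := PySem.Str.slice street (some i) (some (i + L))
              if sk.1.contains sub then sk
              else (sk.1.add sub, sk.2 + ((PySem.Dict.counter cands).getD sub 0)))
            sk)
        ((PySem.Set.empty : PySem.Set String), (0 : Int))
       out ++ List.replicate sk.2.toNat street)
      = out ++ List.replicate (cands.countP fun m => PySem.Str.isIn m street) street := by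
    intro out street
    simp only
    rw [pv_street_count cands street, Int.toNat_natCast]
  simp only [hbody]
  rw [PySem.List.foldl_append_eq_flatMap
        (fun street => List.replicate (cands.countP fun m => PySem.Str.isIn m street) street)
        streets []]
  rw [List.nil_append]
  have hflat : (cands.map fun n => get_street n streets).flatten
      = cands.flatMap fun n => streets.filter (fun s => 0 ≤ PySem.Str.find s n) := by
    simp [List.flatMap, get_street]
  rw [hflat]
  exact PySem.List.sorted_eq_sorted_of_perm _ _ _ (fun _ _ h => h) (pv_perm_core cands streets)
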